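-- pv_equiv track=rewrite | github.com/koii-network/prometheus-beta | src/string_case_converter.py | convert_to_alternating_pascal_case
-- ===== SOURCE A (Python) =====
-- def convert_to_alternating_pascal_case(input_string: str) -> str:
--     """
--     Convert a string to alternating Pascal case.
--
--     Args:
--         input_string (str): The input string to convert.
--
--     Returns:
--         str: The string converted to alternating Pascal case.
--
--     Raises:
--         TypeError: If input is not a string.
--         ValueError: If input is an empty string.
--
--     Examples:
--         >>> convert_to_alternating_pascal_case("hello world")
--         'HeLlO WoRlD'
--         >>> convert_to_alternating_pascal_case("python programming")
--         'PyThOn PrOgRaMmInG'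
--     """
--     # Validate input
--     if not isinstance(input_string, str):
--         raise TypeError("Input must be a string")
--
--     if not input_string:
--         raise ValueError("Input string cannot be empty")
--
--     # Split the string into tokens (words and special characters)
--     tokens = []
--     current_token = ""
--     for char in input_string:
--         if char.isalnum():
--             current_token += char
--         else:
--             if current_token:
--                 tokens.append(current_token)
--                 current_token = ""
--             tokens.append(char)
--
--     if current_token:
--         tokens.append(current_token)
--
--     # Convert alternating case for word tokens
--     processed_tokens = []
--     for token in tokens:
--         if token.isalpha():
--             # Convert to alternating case
--             alternating_token = ''.join(
--                 char.upper() if idx % 2 == 0 else char.lower()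
--                 for idx, char in enumerate(token)
--             )
--             processed_tokens.append(alternating_token)
--         else:
--             # Non-alphabetic tokens remain unchanged
--             processed_tokens.append(token)
--
--     # Join the tokens back together
--     return ''.join(processed_tokens)
-- ===== SOURCE B (Python) =====
-- def convert_to_alternating_pascal_case(input_string: str) -> str:
--     """Two-pointer single pass: scan alnum runs in place and emit output directly,
--     with no intermediate token lists."""
--     if not isinstance(input_string, str):
--         raise TypeError("Input must be a string")
--     if not input_string:
--         raise ValueError("Input string cannot be empty")
--     out = []
--     i, n = 0, len(input_string)
--     while i < n:
--         if input_string[i].isalnum():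
--             j = i
--             while j < n and input_string[j].isalnum():
--                 j += 1
--             token = input_string[i:j]
--             if token.isalpha():
--                 for k, c in enumerate(token):
--                     out.append(c.upper() if k % 2 == 0 else c.lower())
--             else:
--                 out.append(token)
--             i = j
--         else:
--             out.append(input_string[i])
--             i += 1
--     return ''.join(out)
-- ===== Notes on version B (the rewrite author's own statement) =====
-- stated objective: alternative
-- what changed: Replaces A's two-phase pipeline (accumulator loop building a token list, then a second mapping pass and a join) with a single two-pointer scan that consumes each alnum run in place and emits output characters directly, with no intermediate token list.
import Mathlib
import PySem

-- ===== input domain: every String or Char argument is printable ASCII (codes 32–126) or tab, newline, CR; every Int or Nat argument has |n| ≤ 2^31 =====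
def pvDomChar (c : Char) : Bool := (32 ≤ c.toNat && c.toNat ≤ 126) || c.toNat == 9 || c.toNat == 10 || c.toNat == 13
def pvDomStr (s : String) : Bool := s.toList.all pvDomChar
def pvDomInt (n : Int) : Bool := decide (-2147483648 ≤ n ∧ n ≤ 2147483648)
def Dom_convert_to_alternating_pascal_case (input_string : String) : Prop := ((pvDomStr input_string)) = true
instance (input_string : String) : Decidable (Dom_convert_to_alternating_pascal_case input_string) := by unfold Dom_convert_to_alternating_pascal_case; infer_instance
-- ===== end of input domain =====

-- B replaces A's two-phase token-list pipeline with a single two-pointer scan over the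
-- string that emits output directly; equal return values are proved on nonempty strings.

-- ===== PORT A =====
-- A's alternating-case comprehension: enumerate + idx % 2
def pvAltA (t : List Char) : List Char :=
  (PySem.List.enumerate t 0).map
    (fun p => if PySem.Int.mod p.1 2 == 0 then PySem.Chars.upperChar p.2 else PySem.Chars.lowerChar p.2)

-- the tokenising loop: state (tokens, current_token)
def pvTokStep (st : List (List Char) × List Char) (c : Char) : List (List Char) × List Char :=
  if PySem.Chars.isalnum c then (st.1, st.2 ++ [c])
  else ((if st.2 ≠ [] then st.1 ++ [st.2] else st.1) ++ [[c]], [])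

def convert_to_alternating_pascal_case (input_string : String) : String :=
  let st := input_string.toList.foldl pvTokStep ([], [])
  let tokens := if st.2 ≠ [] then st.1 ++ [st.2] else st.1
  let processed := tokens.map (fun t => if PySem.Chars.strIsalpha t then pvAltA t else t)
  String.ofList (PySem.Chars.join [] processed)

-- ===== PORT B =====
-- B's inner for-loop over the token with an index counter k
def pvAltB : List Char → Nat → List Char
  | [], _ => []
  | c :: cs, k =>
    (if k % 2 == 0 then PySem.Chars.upperChar c else PySem.Chars.lowerChar c) :: pvAltB cs (k + 1)

-- B's outer two-pointer scan: the run s[i:j] is takeWhile, the rest is dropWhile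
def pvScanB : List Char → List Char
  | [] => []
  | c :: rest =>
    if PySem.Chars.isalnum c then
      let token := (c :: rest).takeWhile PySem.Chars.isalnum
      (if PySem.Chars.strIsalpha token then pvAltB token 0 else token)
        ++ pvScanB ((c :: rest).dropWhile PySem.Chars.isalnum)
    else
      c :: pvScanB rest
termination_by cs => cs.length
decreasing_by
  · simp only [List.dropWhile_cons, *, if_pos]
    exact Nat.lt_succ_of_le (List.length_dropWhile_le _ _)
  · simp

def convert_to_alternating_pascal_case_alt (input_string : String) : String :=
  String.ofList (pvScanB input_string.toList)

-- ===== PRECONDITION & SPEC =====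
-- Pre_ excludes exactly the empty string, on which A raises ValueError.
def Pre_convert_to_alternating_pascal_case (input_string : String) : Prop := input_string ≠ ""
instance (input_string : String) : Decidable (Pre_convert_to_alternating_pascal_case input_string) := by unfold Pre_convert_to_alternating_pascal_case; infer_instance
def pvWitness_convert_to_alternating_pascal_case : String := "hello world"

def Spec_convert_to_alternating_pascal_case (input_string : String) (out : String) : Prop := out = convert_to_alternating_pascal_case_alt input_string
instance (input_string : String) (out : String) : Decidable (Spec_convert_to_alternating_pascal_case input_string out) := by unfold Spec_convert_to_alternating_pascal_case; infer_instance

-- ===== CLAIM (what is proved, stated in full; the proofs are below) =====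
def Claim_equal_convert_to_alternating_pascal_case : Prop := ∀ (input_string : String), Dom_convert_to_alternating_pascal_case input_string → Pre_convert_to_alternating_pascal_case input_string → Spec_convert_to_alternating_pascal_case input_string (convert_to_alternating_pascal_case input_string)

-- ===== LEMMAS AND PROOFS =====

-- reference tokenisation, in B's recursion shape (proof helper only)
def pvRuns : List Char → List (List Char)
  | [] => []
  | c :: rest =>
    if PySem.Chars.isalnum c then
      ((c :: rest).takeWhile PySem.Chars.isalnum) :: pvRuns ((c :: rest).dropWhile PySem.Chars.isalnum)
    else
      [c] :: pvRuns rest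
termination_by cs => cs.length
decreasing_by
  · simp only [List.dropWhile_cons, *, if_pos]
    exact Nat.lt_succ_of_le (List.length_dropWhile_le _ _)
  · simp

theorem pvAltA_eq_pvAltB (t : List Char) (k : Nat) :
    (PySem.List.enumerate t (k : Int)).map
      (fun p => if PySem.Int.mod p.1 2 == 0 then PySem.Chars.upperChar p.2 else PySem.Chars.lowerChar p.2)
      = pvAltB t k := by
  induction t generalizing k with
  | nil => simp [pvAltB, PySem.List.enumerate_nil]
  | cons c cs ih =>
    rw [PySem.List.enumerate_cons]
    have h2 : ((k : Int)) + 1 = ((k + 1 : Nat) : Int) := by push_cast; ring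
    have hm : PySem.Int.mod (k : Int) 2 = ((k % 2 : Nat) : Int) := by
      exact_mod_cast PySem.Int.mod_natCast k 2
    simp only [List.map_cons, pvAltB, h2, ih]
    congr 1
    simp only [hm]
    rcases Nat.mod_two_eq_zero_or_one k with h | h <;> simp [h]

theorem pvTakeWhile_append_all (l xs : List Char) (hl : l.all PySem.Chars.isalnum = true) :
    (l ++ xs).takeWhile PySem.Chars.isalnum = l ++ xs.takeWhile PySem.Chars.isalnum := by
  induction l with
  | nil => simp
  | cons e es ihe =>
    simp only [List.all_cons, Bool.and_eq_true] at hl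
    simp [hl.1, ihe hl.2]

theorem pvDropWhile_append_all (l xs : List Char) (hl : l.all PySem.Chars.isalnum = true) :
    (l ++ xs).dropWhile PySem.Chars.isalnum = xs.dropWhile PySem.Chars.isalnum := by
  induction l with
  | nil => simp
  | cons e es ihe =>
    simp only [List.all_cons, Bool.and_eq_true] at hl
    simp [hl.1, ihe hl.2]

theorem pvRuns_append_run (cur xs : List Char) (hne : cur ≠ [])
    (hall : cur.all PySem.Chars.isalnum = true) :
    pvRuns (cur ++ xs)
      = (cur ++ xs.takeWhile PySem.Chars.isalnum) :: pvRuns (xs.dropWhile PySem.Chars.isalnum) := by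
  rcases List.exists_cons_of_ne_nil hne with ⟨c, cs, rfl⟩
  simp only [List.all_cons, Bool.and_eq_true] at hall
  rw [List.cons_append, pvRuns]
  simp only [hall.1, if_pos, List.takeWhile_cons, List.dropWhile_cons]
  rw [pvTakeWhile_append_all cs xs hall.2, pvDropWhile_append_all cs xs hall.2]
  simp

theorem pvRuns_all (cur : List Char) (hne : cur ≠ [])
    (hall : cur.all PySem.Chars.isalnum = true) : pvRuns cur = [cur] := by
  have h := pvRuns_append_run cur [] hne hall
  simpa [pvRuns] using h

-- flush of the fold state
def pvFlush (st : List (List Char) × List Char) : List (List Char) :=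
  if st.2 ≠ [] then st.1 ++ [st.2] else st.1

theorem pvFold_runs (cs : List Char) : ∀ (ts : List (List Char)) (cur : List Char),
    cur.all PySem.Chars.isalnum = true →
    pvFlush (cs.foldl pvTokStep (ts, cur)) = ts ++ pvRuns (cur ++ cs) := by
  induction cs with
  | nil =>
    intro ts cur hall
    rcases Decidable.em (cur = []) with h | h
    · subst h; simp [pvFlush, pvRuns]
    · simp only [List.foldl_nil, pvFlush, h, if_pos, List.append_nil, ne_eq, not_false_iff]
      rw [pvRuns_all cur h hall]
  | cons c rest ih =>
    intro ts cur hall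
    rw [List.foldl_cons]
    rcases hc : PySem.Chars.isalnum c with hF | hT
    · rcases Decidable.em (cur = []) with h | h
      · subst h
        have hstep : pvTokStep (ts, ([] : List Char)) c = (ts ++ [[c]], []) := by
          simp [pvTokStep, hc]
        rw [hstep, ih _ [] (by simp), List.nil_append, List.nil_append, pvRuns]
        simp [hc, List.append_assoc]
      · have hstep : pvTokStep (ts, cur) c = ((ts ++ [cur]) ++ [[c]], []) := by
          simp [pvTokStep, hc, h]
        rw [hstep, ih _ [] (by simp), List.nil_append,
          pvRuns_append_run cur (c :: rest) h hall]
        simp [hc, pvRuns, List.append_assoc]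
    · have hstep : pvTokStep (ts, cur) c = (ts, cur ++ [c]) := by
        simp [pvTokStep, hc]
      rw [hstep, ih ts (cur ++ [c]) (by simp_all)]
      simp [List.append_assoc]

theorem pvJoin_nil_flatten (l : List (List Char)) : PySem.Chars.join [] l = l.flatten := by
  induction l with
  | nil => exact PySem.Chars.join_nil []
  | cons t ts ih =>
    cases ts with
    | nil => simp [PySem.Chars.join_singleton]
    | cons x xs => rw [PySem.Chars.join_cons_cons] at *; simp_all

theorem pvJoin_runs_eq_scan (cs : List Char) :
    PySem.Chars.join []
        ((pvRuns cs).map (fun t => if PySem.Chars.strIsalpha t then pvAltA t else t))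
      = pvScanB cs := by
  rw [pvJoin_nil_flatten]
  induction hn : cs.length using Nat.strong_induction_on generalizing cs with
  | _ n ih =>
  subst hn
  match cs with
  | [] => simp [pvRuns, pvScanB]
  | c :: rest =>
    rcases hc : PySem.Chars.isalnum c with hF | hT
    · rw [pvRuns, pvScanB]
      simp only [hc, Bool.false_eq_true, if_false, List.map_cons, List.flatten_cons]
      have hrec := ih rest.length (by simp) rest rfl
      have hna : PySem.Chars.strIsalpha [c] = false := by
        have halpha : PySem.Chars.isalpha c = false := by
          have h := hc
          simp only [PySem.Chars.isalnum, Bool.or_eq_false_iff] at h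
          exact h.1
        simp [PySem.Chars.strIsalpha, halpha]
      rw [hna]
      simp [hrec]
    · rw [pvRuns, pvScanB]
      simp only [hc, if_true, List.map_cons, List.flatten_cons]
      have hlt : ((c :: rest).dropWhile PySem.Chars.isalnum).length < (c :: rest).length := by
        simp only [List.dropWhile_cons, hc, if_pos]
        exact Nat.lt_succ_of_le (List.length_dropWhile_le _ _)
      have hrec := ih _ hlt ((c :: rest).dropWhile PySem.Chars.isalnum) rfl
      rw [hrec]
      congr 1
      rcases h : PySem.Chars.strIsalpha ((c :: rest).takeWhile PySem.Chars.isalnum) with _ | _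
      · simp
      · simp only [if_true]
        unfold pvAltA
        exact pvAltA_eq_pvAltB _ 0

-- ===== VERDICT (by name: the statement is the Claim_ definition above) =====
theorem convert_to_alternating_pascal_case_spec : Claim_equal_convert_to_alternating_pascal_case := by
  intro s _ _
  unfold Spec_convert_to_alternating_pascal_case
  unfold convert_to_alternating_pascal_case convert_to_alternating_pascal_case_alt
  have h := pvFold_runs s.toList [] [] (by simp)
  simp only [pvFlush] at h
  simp only [h, List.nil_append]
  rw [pvJoin_runs_eq_scan]
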